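-- pv_equiv track=rewrite | github.com/pigscript/PigScript1.2 | PigScript1.2.py | parse
-- ===== SOURCE A (Python) =====
-- def parse(pixblock, palette, ind, minlength=0):
-- 	segments=[]
-- 	height=len(pixblock)
-- 	width=len(pixblock[0])
-- 	red,green,blue=palette[ind][:3]
-- 	for j in range(height):
-- 		flag = 0
-- 		for i in range(width):
-- 			r,g,b,a = pixblock[j][i]
-- 			if (red<0 or max(abs(red-r),abs(green-g),abs(blue-b)) <= 32) and a>150:
-- 				pixblock[j][i] = (255,255,255,0)
-- 				if flag==0:
-- 					flag = 1
-- 					xl = i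
-- 			else:
-- 				if flag==1:
-- 					flag=0
-- 					xr = i-1
-- 					if xr-xl>=minlength:
-- 						segments.append((j,xl,xr))
-- 		if flag==1:
-- 			xr=i
-- 			if xr-xl>=minlength:
-- 				segments.append((j,xl,xr))
-- 	return segments, pixblock
-- ===== SOURCE B (Python) =====
-- # Two-phase rewrite: per row, classify pixels into a boolean mask (rewriting
-- # matches to white), then extract maximal runs from the mask.  Returns a fresh
-- # pixel block instead of mutating the argument in place (A mutates pixblock;
-- # the returned value is the same).
-- def parse(pixblock, palette, ind, minlength=0):
--     width = len(pixblock[0])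
--     red, green, blue = palette[ind][:3]
--
--     def matches(px):
--         r, g, b, a = px
--         return (red < 0 or max(abs(red - r), abs(green - g), abs(blue - b)) <= 32) and a > 150
--
--     segments = []
--     newblock = []
--     for j, row in enumerate(pixblock):
--         mask = [matches(px) for px in row[:width]]
--         newblock.append([(255, 255, 255, 0) if (i < width and mask[i]) else px
--                          for i, px in enumerate(row)])
--         segments.extend(_runs(j, minlength, mask))
--     return segments, newblock
--
--
-- def _runs(j, minlength, mask):
--     segs = []
--     i, n = 0, len(mask)
--     while i < n:
--         if mask[i]:
--             k = 1
--             while i + k < n and mask[i + k]: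
--                 k += 1
--             if k - 1 >= minlength:
--                 segs.append((j, i, i + k - 1))
--             i += k
--         else:
--             i += 1
--     return segs
-- ===== Notes on version B (the rewrite author's own statement) =====
-- stated objective: alternative
-- what changed: A interleaves pixel mutation and segment detection in one inline flag/xl state machine per row; B separates each row into two phases - one pass building a boolean match-mask (and the rewritten row) and a second index scan extracting maximal runs from the mask - and builds a new block instead of mutating in place.
import Mathlib
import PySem

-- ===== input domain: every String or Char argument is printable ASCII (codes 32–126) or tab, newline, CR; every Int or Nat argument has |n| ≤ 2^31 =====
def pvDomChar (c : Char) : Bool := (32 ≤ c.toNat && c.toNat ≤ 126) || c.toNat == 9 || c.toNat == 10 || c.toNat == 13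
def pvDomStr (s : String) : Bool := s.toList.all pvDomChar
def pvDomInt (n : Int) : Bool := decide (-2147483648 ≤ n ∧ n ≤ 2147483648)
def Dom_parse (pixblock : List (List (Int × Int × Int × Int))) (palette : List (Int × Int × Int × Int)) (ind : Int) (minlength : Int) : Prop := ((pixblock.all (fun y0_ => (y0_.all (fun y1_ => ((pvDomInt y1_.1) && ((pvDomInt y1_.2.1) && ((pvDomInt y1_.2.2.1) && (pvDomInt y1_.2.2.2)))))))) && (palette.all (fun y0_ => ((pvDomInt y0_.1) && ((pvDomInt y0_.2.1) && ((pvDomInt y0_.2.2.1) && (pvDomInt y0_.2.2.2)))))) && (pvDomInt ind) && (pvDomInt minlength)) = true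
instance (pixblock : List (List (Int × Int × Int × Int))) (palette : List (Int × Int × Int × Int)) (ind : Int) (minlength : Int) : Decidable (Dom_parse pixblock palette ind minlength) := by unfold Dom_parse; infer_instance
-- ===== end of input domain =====

-- B re-implements A's one-pass inline flag state machine as two phases per row (mask building, then
-- run extraction) and builds a new block; A mutates pixblock in place — the equivalence is about the
-- returned value (A returns the mutated block, B an equal fresh one).

-- ===== PORT A =====
-- body of A's inner 'for i in range(width)' loop; state = (segments, pixblock, flag, xl)
def pvStepA (red green blue minlength j : Int)
    (st : List (Int × Int × Int) × List (List (Int × Int × Int × Int)) × Int × Int) (i : Int) :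
    List (Int × Int × Int) × List (List (Int × Int × Int × Int)) × Int × Int :=
  let px := PySem.List.pyGetD (PySem.List.pyGetD st.2.1 j []) i (0, 0, 0, 0)   -- r,g,b,a = pixblock[j][i]
  if (red < 0 ∨ max |red - px.1| (max |green - px.2.1| |blue - px.2.2.1|) ≤ 32) ∧ px.2.2.2 > 150 then
    let block := PySem.List.pySetD st.2.1 j
      (PySem.List.pySetD (PySem.List.pyGetD st.2.1 j []) i (255, 255, 255, 0))  -- pixblock[j][i] = (255,255,255,0)
    if st.2.2.1 = 0 then (st.1, block, 1, i) else (st.1, block, st.2.2.1, st.2.2.2)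
  else
    if st.2.2.1 = 1 then
      ((if (i - 1) - st.2.2.2 ≥ minlength then st.1 ++ [(j, st.2.2.2, i - 1)] else st.1),
       st.2.1, 0, st.2.2.2)
    else st

-- A's per-row epilogue 'if flag==1: xr=i; …'; flag=1 implies the loop ran, so i = width-1 there
def pvFinishA {β : Type} (minlength j width : Int) (st : List (Int × Int × Int) × β × Int × Int) :
    List (Int × Int × Int) × β :=
  if st.2.2.1 = 1 then
    ((if (width - 1) - st.2.2.2 ≥ minlength then st.1 ++ [(j, st.2.2.2, width - 1)] else st.1), st.2.1)
  else (st.1, st.2.1)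

def parse (pixblock : List (List (Int × Int × Int × Int))) (palette : List (Int × Int × Int × Int)) (ind : Int) (minlength : Int) : (List (Int × Int × Int)) × (List (List (Int × Int × Int × Int))) :=
  let height : Int := pixblock.length
  let width : Int := (PySem.List.pyGetD pixblock 0 []).length   -- len(pixblock[0]); Pre_ excludes the empty block (IndexError)
  let pal := PySem.List.pyGetD palette ind (0, 0, 0, 0)          -- palette[ind]; Pre_ excludes ind out of range (IndexError)
  let red := pal.1
  let green := pal.2.1
  let blue := pal.2.2.1
  (PySem.List.pyRange 0 height).foldl (fun st j =>
      pvFinishA minlength j width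
        ((PySem.List.pyRange 0 width).foldl (pvStepA red green blue minlength j) (st.1, st.2, 0, 0)))
    ([], pixblock)

-- ===== PORT B =====
-- B's helper 'matches(px)'
def pvMatch (red green blue : Int) (px : Int × Int × Int × Int) : Bool :=
  (decide (red < 0) || decide (max |red - px.1| (max |green - px.2.1| |blue - px.2.2.1|) ≤ 32))
    && decide (px.2.2.2 > 150)

-- B's helper '_runs': outer while over positions, inner while counting the run length k.
-- The while loop advances i by at least 1 per iteration, so len(mask) iterations suffice:
-- pvRunsF's first argument is that (structural) iteration bound.
def pvRunsF (j minlength : Int) : Nat → List Bool → Int → List (Int × Int × Int)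
  | 0, _, _ => []
  | _ + 1, [], _ => []
  | fuel + 1, false :: rest, pos => pvRunsF j minlength fuel rest (pos + 1)
  | fuel + 1, true :: rest, pos =>
      let k : Int := 1 + (rest.takeWhile id).length
      (if k - 1 ≥ minlength then [(j, pos, pos + k - 1)] else []) ++
        pvRunsF j minlength fuel (rest.dropWhile id) (pos + k)

def pvRuns (j minlength : Int) (mask : List Bool) (pos : Int) : List (Int × Int × Int) :=
  pvRunsF j minlength mask.length mask pos

def parse_alt (pixblock : List (List (Int × Int × Int × Int))) (palette : List (Int × Int × Int × Int)) (ind : Int) (minlength : Int) : (List (Int × Int × Int)) × (List (List (Int × Int × Int × Int))) :=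
  let width := (PySem.List.pyGetD pixblock 0 []).length          -- len(pixblock[0])
  let pal := PySem.List.pyGetD palette ind (0, 0, 0, 0)          -- palette[ind]
  let red := pal.1
  let green := pal.2.1
  let blue := pal.2.2.1
  (PySem.List.enumerate pixblock).foldl (fun st jrow =>
      let mask := (jrow.2.take width).map (pvMatch red green blue)   -- row[:width] (width ≥ 0, so the slice is a take)
      let newrow := (PySem.List.enumerate jrow.2).map (fun ipx =>
          if ipx.1 < (width : Int) ∧ mask.getD ipx.1.toNat false then (255, 255, 255, 0) else ipx.2)
      (st.1 ++ pvRuns jrow.1 minlength mask 0, st.2 ++ [newrow]))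
    ([], [])

-- ===== PRECONDITION & SPEC =====
-- Pre_ excludes exactly the inputs where Python A raises IndexError: an empty pixblock
-- (pixblock[0]), a palette index out of range (palette[ind]), and blocks in which some row is
-- shorter than the first row (pixblock[j][i] with i < width = len(pixblock[0])).
def Pre_parse (pixblock : List (List (Int × Int × Int × Int))) (palette : List (Int × Int × Int × Int)) (ind : Int) (minlength : Int) : Prop :=
  pixblock ≠ [] ∧ PySem.Raise.InRange palette.length ind ∧
    ∀ row ∈ pixblock, (pixblock.headD []).length ≤ row.length
instance (pixblock : List (List (Int × Int × Int × Int))) (palette : List (Int × Int × Int × Int)) (ind : Int) (minlength : Int) : Decidable (Pre_parse pixblock palette ind minlength) := by unfold Pre_parse; infer_instance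
def pvWitness_parse : (List (List (Int × Int × Int × Int))) × (List (Int × Int × Int × Int)) × Int × Int :=
  ([[(0, 0, 0, 255), (200, 0, 0, 255)]], [(10, 0, 0, 0)], 0, 0)

def Spec_parse (pixblock : List (List (Int × Int × Int × Int))) (palette : List (Int × Int × Int × Int)) (ind : Int) (minlength : Int) (out : (List (Int × Int × Int)) × (List (List (Int × Int × Int × Int)))) : Prop := out = parse_alt pixblock palette ind minlength
instance (pixblock : List (List (Int × Int × Int × Int))) (palette : List (Int × Int × Int × Int)) (ind : Int) (minlength : Int) (out : (List (Int × Int × Int)) × (List (List (Int × Int × Int × Int)))) : Decidable (Spec_parse pixblock palette ind minlength out) := by unfold Spec_parse; infer_instance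

-- ===== CLAIM (what is proved, stated in full; the proofs are below) =====
def Claim_equal_parse : Prop := ∀ (pixblock : List (List (Int × Int × Int × Int))) (palette : List (Int × Int × Int × Int)) (ind : Int) (minlength : Int), Dom_parse pixblock palette ind minlength → Pre_parse pixblock palette ind minlength → Spec_parse pixblock palette ind minlength (parse pixblock palette ind minlength)
-- ===== LEMMAS AND PROOFS =====

set_option maxHeartbeats 1000000

-- whitener applied pointwise to a matched pixel
def pvW (red green blue : Int) (p : Int × Int × Int × Int) : Int × Int × Int × Int :=
  if pvMatch red green blue p then (255, 255, 255, 0) else p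

-- (flag, xl) encoded from an optional open-run start
def pvCF : Option Int → Int → Int × Int
  | none, xl0 => (0, xl0)
  | some xl, _ => (1, xl)

-- canonical carry-aware run extractor over a mask suffix starting at position pos
def pvSegsGo (minlength j : Int) (mask : List Bool) (pos : Int) (carry : Option Int) :
    List (Int × Int × Int) :=
  match mask, carry with
  | [], none => []
  | [], some xl => if (pos - 1) - xl ≥ minlength then [(j, xl, pos - 1)] else []
  | b :: rest, none =>
      if b then pvSegsGo minlength j rest (pos + 1) (some pos)
      else pvSegsGo minlength j rest (pos + 1) none
  | b :: rest, some xl =>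
      if b then pvSegsGo minlength j rest (pos + 1) (some xl)
      else (if (pos - 1) - xl ≥ minlength then [(j, xl, pos - 1)] else []) ++
        pvSegsGo minlength j rest (pos + 1) none

-- A's inner-loop body restricted to the one row it touches
def pvStepR (red green blue minlength j : Int)
    (st : List (Int × Int × Int) × List (Int × Int × Int × Int) × Int × Int) (i : Int) :
    List (Int × Int × Int) × List (Int × Int × Int × Int) × Int × Int :=
  let px := PySem.List.pyGetD st.2.1 i (0, 0, 0, 0)
  if (red < 0 ∨ max |red - px.1| (max |green - px.2.1| |blue - px.2.2.1|) ≤ 32) ∧ px.2.2.2 > 150 then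
    let row := PySem.List.pySetD st.2.1 i (255, 255, 255, 0)
    if st.2.2.1 = 0 then (st.1, row, 1, i) else (st.1, row, st.2.2.1, st.2.2.2)
  else
    if st.2.2.1 = 1 then
      ((if (i - 1) - st.2.2.2 ≥ minlength then st.1 ++ [(j, st.2.2.2, i - 1)] else st.1),
       st.2.1, 0, st.2.2.2)
    else st

lemma pvMatch_iff (red green blue : Int) (px : Int × Int × Int × Int) :
    pvMatch red green blue px = true ↔
      ((red < 0 ∨ max |red - px.1| (max |green - px.2.1| |blue - px.2.2.1|) ≤ 32) ∧ px.2.2.2 > 150) := by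
  simp [pvMatch]

lemma pyGetD_nat {α : Type} (xs : List α) (n : Nat) (d : α) (h : n < xs.length) :
    PySem.List.pyGetD xs (n : Int) d = xs[n] := by
  rw [PySem.List.pyGetD_natCast]
  exact List.getD_eq_getElem xs d h

lemma pySetD_nat {α : Type} (xs : List α) (n : Nat) (v : α) (h : n < xs.length) :
    PySem.List.pySetD xs (n : Int) v = xs.set n v := by
  simp [PySem.List.pySetD, PySem.List.pySet?_natCast xs n v h]

lemma pvDropSet {α : Type} (l : List α) (s : Nat) (a : α) (t : Nat) (h : s < t) :
    (l.set s a).drop t = l.drop t := by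
  apply List.ext_getElem (by simp)
  intro i h1 h2
  simp only [List.getElem_drop, List.getElem_set]
  rw [if_neg (by omega)]

lemma pvTakeSet {α : Type} (l : List α) (s : Nat) (a : α) (h : s < l.length) :
    (l.set s a).take (s + 1) = l.take s ++ [a] := by
  apply List.ext_getElem (by simp; omega)
  intro i h1 h2
  simp only [List.getElem_take, List.getElem_set]
  by_cases hi : i = s
  · subst hi
    rw [if_pos rfl, List.getElem_append_right (by simp only [List.length_take]; omega)]
    simp
  · rw [if_neg (Ne.symm hi), List.getElem_append_left
      (by simp only [List.length_take, List.length_set] at h1 h2 ⊢; omega)]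
    simp [List.getElem_take]

lemma pvTakeSucc {α : Type} (l : List α) (s : Nat) (h : s < l.length) :
    l.take (s + 1) = l.take s ++ [l[s]] := by
  rw [List.take_succ]
  simp [List.getElem?_eq_getElem h]

lemma pvSetSelf {α : Type} (l : List α) (s : Nat) (h : s < l.length) :
    l.set s l[s] = l := by
  apply List.ext_getElem (by simp)
  intro i h1 h2
  simp only [List.getElem_set]
  by_cases hi : s = i
  · subst hi; simp
  · rw [if_neg hi]

-- one A-step on a block touching row jn = the row-level step, lifted through List.set
lemma stepA_set (red green blue minlength : Int) (jn : Nat)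
    (block : List (List (Int × Int × Int × Int))) (h : jn < block.length)
    (segs : List (Int × Int × Int)) (rowc : List (Int × Int × Int × Int)) (f x i : Int) :
    pvStepA red green blue minlength (jn : Int) (segs, block.set jn rowc, f, x) i =
      ((pvStepR red green blue minlength (jn : Int) (segs, rowc, f, x) i).1,
       block.set jn (pvStepR red green blue minlength (jn : Int) (segs, rowc, f, x) i).2.1,
       (pvStepR red green blue minlength (jn : Int) (segs, rowc, f, x) i).2.2.1,
       (pvStepR red green blue minlength (jn : Int) (segs, rowc, f, x) i).2.2.2) := by
  have hlen : jn < (block.set jn rowc).length := by simpa using h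
  have hget : PySem.List.pyGetD (block.set jn rowc) (jn : Int) [] = rowc := by
    rw [pyGetD_nat _ _ _ hlen]
    simp
  have hset : ∀ r', PySem.List.pySetD (block.set jn rowc) (jn : Int) r' = block.set jn r' := by
    intro r'
    rw [pySetD_nat _ _ _ hlen, List.set_set]
  simp only [pvStepA, pvStepR, hget, hset]
  split_ifs <;> rfl

lemma foldA_set (red green blue minlength : Int) (jn : Nat)
    (block : List (List (Int × Int × Int × Int))) (h : jn < block.length)
    (is : List Int) (segs : List (Int × Int × Int)) (rowc : List (Int × Int × Int × Int)) (f x : Int) :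
    is.foldl (pvStepA red green blue minlength (jn : Int)) (segs, block.set jn rowc, f, x) =
      ((is.foldl (pvStepR red green blue minlength (jn : Int)) (segs, rowc, f, x)).1,
       block.set jn (is.foldl (pvStepR red green blue minlength (jn : Int)) (segs, rowc, f, x)).2.1,
       (is.foldl (pvStepR red green blue minlength (jn : Int)) (segs, rowc, f, x)).2.2.1,
       (is.foldl (pvStepR red green blue minlength (jn : Int)) (segs, rowc, f, x)).2.2.2) := by
  induction is generalizing segs rowc f x with
  | nil => rfl
  | cons i is ih =>
      simp only [List.foldl_cons]
      rw [stepA_set red green blue minlength jn block h]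
      exact ih _ _ _ _

-- A's row epilogue commutes with re-inserting the row into the block
lemma finishA_set (minlength j wI : Int) (block : List (List (Int × Int × Int × Int))) (s : Nat)
    (S : List (Int × Int × Int) × List (Int × Int × Int × Int) × Int × Int) :
    pvFinishA minlength j wI (S.1, block.set s S.2.1, S.2.2.1, S.2.2.2) =
      ((pvFinishA minlength j wI S).1, block.set s (pvFinishA minlength j wI S).2) := by
  obtain ⟨a, b, c, d⟩ := S
  simp only [pvFinishA]
  split_ifs <;> rfl

lemma segsGo_true (minlength j : Int) (X : List Bool) (pos : Int) :
    pvSegsGo minlength j (true :: X) pos none = pvSegsGo minlength j X (pos + 1) (some pos) := by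
  simp [pvSegsGo]

lemma segsGo_true' (minlength j : Int) (X : List Bool) (pos xl : Int) :
    pvSegsGo minlength j (true :: X) pos (some xl) = pvSegsGo minlength j X (pos + 1) (some xl) := by
  simp [pvSegsGo]

lemma segsGo_false (minlength j : Int) (X : List Bool) (pos : Int) :
    pvSegsGo minlength j (false :: X) pos none = pvSegsGo minlength j X (pos + 1) none := by
  simp [pvSegsGo]

lemma segsGo_false' (minlength j : Int) (X : List Bool) (pos xl : Int) :
    pvSegsGo minlength j (false :: X) pos (some xl) =
      (if (pos - 1) - xl ≥ minlength then [(j, xl, pos - 1)] else []) ++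
        pvSegsGo minlength j X (pos + 1) none := by
  simp [pvSegsGo]

-- the row-level machine, characterised: carry-machine runs + pointwise whitening
lemma L_row (red green blue minlength j : Int) :
    ∀ (n s : Nat) (rowc : List (Int × Int × Int × Int)) (segs : List (Int × Int × Int))
      (carry : Option Int) (xl0 : Int), s + n ≤ rowc.length →
    pvFinishA minlength j ((s + n : Nat) : Int)
        ((PySem.List.pyRange (s : Int) ((s + n : Nat) : Int)).foldl
          (pvStepR red green blue minlength j)
          (segs, rowc, (pvCF carry xl0).1, (pvCF carry xl0).2)) =
      (segs ++ pvSegsGo minlength j (((rowc.drop s).take n).map (pvMatch red green blue)) (s : Int) carry,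
       rowc.take s ++ ((rowc.drop s).take n).map (pvW red green blue) ++ rowc.drop (s + n)) := by
  intro n
  induction n with
  | zero =>
      intro s rowc segs carry xl0 _
      have hr : PySem.List.pyRange (s : Int) ((s + 0 : Nat) : Int) = [] := by
        simp [pysem]
      rw [hr]
      cases carry with
      | none => simp [pvFinishA, pvCF, pvSegsGo, List.take_append_drop]
      | some xl =>
          simp only [List.foldl_nil, pvFinishA, pvCF, Nat.add_zero, List.take_zero, List.map_nil,
            pvSegsGo]
          norm_num
          split_ifs <;> simp [List.take_append_drop]
  | succ n ih =>
      intro s rowc segs carry xl0 hle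
      have e : s + (n + 1) = (s + 1) + n := by omega
      rw [e]
      have hs : s < rowc.length := by omega
      have hc1 : (((s + 1 : Nat)) : Int) = (s : Int) + 1 := by push_cast; ring
      have hcons : PySem.List.pyRange (s : Int) (((s + 1) + n : Nat) : Int)
          = (s : Int) :: PySem.List.pyRange (((s + 1 : Nat)) : Int) (((s + 1) + n : Nat) : Int) := by
        rw [PySem.List.pyRange_one_cons (by push_cast; omega), hc1]
      rw [hcons, List.foldl_cons]
      have hpx : PySem.List.pyGetD rowc (s : Int) (0, 0, 0, 0) = rowc[s] := pyGetD_nat _ _ _ hs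
      have hdrop : rowc.drop s = rowc[s] :: rowc.drop (s + 1) := List.drop_eq_getElem_cons hs
      by_cases hm : pvMatch red green blue rowc[s] = true
      · have hc : ((red < 0 ∨ max |red - rowc[s].1| (max |green - rowc[s].2.1| |blue - rowc[s].2.2.1|) ≤ 32) ∧ rowc[s].2.2.2 > 150) :=
          (pvMatch_iff _ _ _ _).mp hm
        have hwv : pvW red green blue rowc[s] = (255, 255, 255, 0) := by simp [pvW, hm]
        cases carry with
        | none =>
            have hstep : pvStepR red green blue minlength j
                (segs, rowc, (pvCF (none : Option Int) xl0).1, (pvCF (none : Option Int) xl0).2) ((s : Nat) : Int)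
                = (segs, rowc.set s (255, 255, 255, 0), 1, ((s : Nat) : Int)) := by
              simp only [pvStepR, pvCF]
              rw [hpx, if_pos hc, pySetD_nat _ _ _ hs]
              norm_num
            rw [hstep]
            have ihres := ih (s + 1) (rowc.set s (255, 255, 255, 0)) segs (some (s : Int)) xl0
              (by simp; omega)
            simp only [pvCF] at ihres
            rw [ihres]
            rw [pvDropSet _ _ _ _ (by omega), pvDropSet _ _ _ _ (by omega), pvTakeSet _ _ _ hs, hdrop]
            simp only [List.take_succ_cons, List.map_cons, hm, Prod.mk.injEq]
            refine ⟨?_, ?_⟩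
            · rw [segsGo_true, hc1]
            · rw [hwv]
              simp only [List.append_assoc, List.singleton_append]
        | some xl =>
            have hstep : pvStepR red green blue minlength j
                (segs, rowc, (pvCF (some xl) xl0).1, (pvCF (some xl) xl0).2) ((s : Nat) : Int)
                = (segs, rowc.set s (255, 255, 255, 0), 1, xl) := by
              simp only [pvStepR, pvCF]
              rw [hpx, if_pos hc, pySetD_nat _ _ _ hs]
              norm_num
            rw [hstep]
            have ihres := ih (s + 1) (rowc.set s (255, 255, 255, 0)) segs (some xl) xl0
              (by simp; omega)
            simp only [pvCF] at ihres
            rw [ihres]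
            rw [pvDropSet _ _ _ _ (by omega), pvDropSet _ _ _ _ (by omega), pvTakeSet _ _ _ hs, hdrop]
            simp only [List.take_succ_cons, List.map_cons, hm, Prod.mk.injEq]
            refine ⟨?_, ?_⟩
            · rw [segsGo_true', hc1]
            · rw [hwv]
              simp only [List.append_assoc, List.singleton_append]
      · have hc : ¬((red < 0 ∨ max |red - rowc[s].1| (max |green - rowc[s].2.1| |blue - rowc[s].2.2.1|) ≤ 32) ∧ rowc[s].2.2.2 > 150) :=
          fun hcc => hm ((pvMatch_iff _ _ _ _).mpr hcc)
        have hmf : pvMatch red green blue rowc[s] = false := by simpa using hm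
        have hwv : pvW red green blue rowc[s] = rowc[s] := by simp [pvW, hmf]
        cases carry with
        | none =>
            have hstep : pvStepR red green blue minlength j
                (segs, rowc, (pvCF (none : Option Int) xl0).1, (pvCF (none : Option Int) xl0).2) ((s : Nat) : Int)
                = (segs, rowc, 0, xl0) := by
              simp only [pvStepR, pvCF]
              rw [hpx, if_neg hc]
              norm_num
            rw [hstep]
            have ihres := ih (s + 1) rowc segs none xl0 (by omega)
            simp only [pvCF] at ihres
            rw [ihres]
            rw [hdrop, pvTakeSucc _ _ hs]
            simp only [List.take_succ_cons, List.map_cons, hmf, Prod.mk.injEq]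
            refine ⟨?_, ?_⟩
            · rw [segsGo_false, hc1]
            · rw [hwv]
              simp only [List.append_assoc, List.singleton_append]
        | some xl =>
            have hstep : pvStepR red green blue minlength j
                (segs, rowc, (pvCF (some xl) xl0).1, (pvCF (some xl) xl0).2) ((s : Nat) : Int)
                = ((if ((s : Int) - 1) - xl ≥ minlength then segs ++ [(j, xl, (s : Int) - 1)] else segs),
                   rowc, 0, xl) := by
              simp only [pvStepR, pvCF]
              rw [hpx, if_neg hc]
              norm_num
            rw [hstep]
            have ihres := ih (s + 1) rowc
              (if ((s : Int) - 1) - xl ≥ minlength then segs ++ [(j, xl, (s : Int) - 1)] else segs)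
              none xl (by omega)
            simp only [pvCF] at ihres
            rw [ihres]
            rw [hdrop, pvTakeSucc _ _ hs]
            simp only [List.take_succ_cons, List.map_cons, hmf, Prod.mk.injEq]
            refine ⟨?_, ?_⟩
            · rw [segsGo_false', hc1]
              split_ifs <;> simp [List.append_assoc]
            · rw [hwv]
              simp only [List.append_assoc, List.singleton_append]

-- the carry form of B's inner while (a run in progress absorbs the leading trues)
lemma g2 (minlength j : Int) :
    ∀ (mask : List Bool) (pos xl : Int),
    pvSegsGo minlength j mask pos (some xl) =
      (if (pos + ((mask.takeWhile id).length : Int) - 1) - xl ≥ minlength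
        then [(j, xl, pos + ((mask.takeWhile id).length : Int) - 1)] else []) ++
      pvSegsGo minlength j (mask.dropWhile id) (pos + ((mask.takeWhile id).length : Int)) none := by
  intro mask
  induction mask with
  | nil => intro pos xl; simp [pvSegsGo]
  | cons b rest ih =>
      intro pos xl
      cases b with
      | false => simp [pvSegsGo]
      | true =>
          rw [show pvSegsGo minlength j (true :: rest) pos (some xl)
              = pvSegsGo minlength j rest (pos + 1) (some xl) from by simp [pvSegsGo]]
          rw [ih (pos + 1) xl]
          have h1 : (pos + 1) + ((rest.takeWhile id).length : Int)
              = pos + (((rest.takeWhile id).length + 1 : Nat) : Int) := by push_cast; ring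
          simp only [List.takeWhile_cons, List.dropWhile_cons, id_eq, if_true, List.length_cons, h1]

-- B's run extractor agrees with the carry machine started with no open run
lemma g1F (minlength j : Int) :
    ∀ (fuel : Nat) (mask : List Bool) (pos : Int), mask.length ≤ fuel →
    pvSegsGo minlength j mask pos none = pvRunsF j minlength fuel mask pos := by
  intro fuel
  induction fuel with
  | zero =>
      intro mask pos h
      have : mask = [] := List.eq_nil_of_length_eq_zero (by omega)
      subst this
      simp [pvSegsGo, pvRunsF]
  | succ fuel ih =>
      intro mask pos h
      match mask with
      | [] => simp [pvSegsGo, pvRunsF]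
      | false :: rest =>
          rw [show pvSegsGo minlength j (false :: rest) pos none
              = pvSegsGo minlength j rest (pos + 1) none from by simp [pvSegsGo]]
          rw [ih rest (pos + 1) (by simp at h; omega)]
          rfl
      | true :: rest =>
          rw [show pvSegsGo minlength j (true :: rest) pos none
              = pvSegsGo minlength j rest (pos + 1) (some pos) from by simp [pvSegsGo]]
          rw [g2]
          rw [ih (rest.dropWhile id) ((pos + 1) + ((rest.takeWhile id).length : Int))
            (le_trans (List.length_dropWhile_le id rest) (by simp at h; omega))]
          simp only [pvRunsF]
          have h2 : ((pos + 1) + ((rest.takeWhile id).length : Int) - 1) - pos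
              = (1 + ((rest.takeWhile id).length : Int)) - 1 := by ring
          have h3 : (pos + 1) + ((rest.takeWhile id).length : Int) - 1
              = pos + (1 + ((rest.takeWhile id).length : Int)) - 1 := by ring
          have h4 : (pos + 1) + ((rest.takeWhile id).length : Int)
              = pos + (1 + ((rest.takeWhile id).length : Int)) := by ring
          rw [h2, h3, h4]

lemma g1 (minlength j : Int) (mask : List Bool) (pos : Int) :
    pvSegsGo minlength j mask pos none = pvRuns j minlength mask pos :=
  g1F minlength j mask.length mask pos le_rfl

-- B's enumerate-comprehension row equals whitened prefix ++ untouched suffix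
lemma L_newrow (red green blue : Int) (w : Nat) (row : List (Int × Int × Int × Int)) :
    (PySem.List.enumerate row).map (fun ipx =>
        if ipx.1 < (w : Int) ∧ ((row.take w).map (pvMatch red green blue)).getD ipx.1.toNat false
        then (255, 255, 255, 0) else ipx.2) =
      (row.take w).map (pvW red green blue) ++ row.drop w := by
  apply List.ext_getElem (by simp [PySem.List.length_enumerate]; omega)
  intro i h1 h2
  have hi : i < row.length := by simpa [PySem.List.length_enumerate] using h1
  rw [List.getElem_map]
  rw [PySem.List.getElem_enumerate _ _ i (by simpa [PySem.List.length_enumerate] using hi)]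
  simp only [zero_add, Int.toNat_natCast]
  by_cases hiw : i < w
  · have hmask : (((row.take w).map (pvMatch red green blue)).getD i false)
        = pvMatch red green blue row[i] := by
      rw [List.getD_eq_getElem _ _ (by simp; omega)]
      simp [List.getElem_take]
    rw [hmask]
    have hlt : (i : Int) < (w : Int) := by exact_mod_cast hiw
    rw [List.getElem_append_left (by simp; omega)]
    rw [List.getElem_map]
    by_cases hm : pvMatch red green blue row[i] = true
    · simp [List.getElem_take, hm, pvW, hlt]
    · simp [List.getElem_take, hm, pvW, hlt]
  · have hge : ¬((i : Int) < (w : Int)) := by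
      push_cast
      omega
    rw [List.getElem_append_right (by simp; omega)]
    simp only [hge, false_and, if_false, List.getElem_drop]
    congr 1
    simp
    omega

-- A's whole outer loop, characterised
lemma L_outer (red green blue minlength : Int) (w : Nat) :
    ∀ (n s : Nat) (block : List (List (Int × Int × Int × Int))) (segs : List (Int × Int × Int)),
      block.length = s + n → (∀ row ∈ block.drop s, w ≤ row.length) →
    (PySem.List.pyRange (s : Int) ((s + n : Nat) : Int)).foldl (fun st j =>
        pvFinishA minlength j (w : Int)
          ((PySem.List.pyRange 0 (w : Int)).foldl (pvStepA red green blue minlength j) (st.1, st.2, 0, 0)))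
      (segs, block) =
      (segs ++ (PySem.List.enumerate (block.drop s) (s : Int)).flatMap (fun jrow =>
          pvSegsGo minlength jrow.1 ((jrow.2.take w).map (pvMatch red green blue)) 0 none),
       block.take s ++ (block.drop s).map (fun row => (row.take w).map (pvW red green blue) ++ row.drop w)) := by
  intro n
  induction n with
  | zero =>
      intro s block segs hlen _
      have hr : PySem.List.pyRange (s : Int) ((s + 0 : Nat) : Int) = [] := by simp [pysem]
      rw [hr]
      have hd : block.drop s = [] := List.drop_of_length_le (by omega)
      have ht : block.take s = block := List.take_of_length_le (by omega)
      simp [hd, ht]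
  | succ n ih =>
      intro s block segs hlen hrows
      have e : s + (n + 1) = (s + 1) + n := by omega
      rw [e]
      have hsb : s < block.length := by omega
      have hdropb : block.drop s = block[s] :: block.drop (s + 1) := List.drop_eq_getElem_cons hsb
      have hw : w ≤ block[s].length :=
        hrows _ (by rw [hdropb]; exact List.mem_cons_self ..)
      have hc1 : (((s + 1 : Nat)) : Int) = (s : Int) + 1 := by push_cast; ring
      have hcons : PySem.List.pyRange (s : Int) (((s + 1) + n : Nat) : Int)
          = (s : Int) :: PySem.List.pyRange (((s + 1 : Nat)) : Int) (((s + 1) + n : Nat) : Int) := by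
        rw [PySem.List.pyRange_one_cons (by push_cast; omega), hc1]
      rw [hcons, List.foldl_cons]
      conv_lhs => rw [show block = block.set s block[s] from (pvSetSelf block s hsb).symm]
      rw [foldA_set red green blue minlength s block hsb]
      rw [finishA_set]
      have hrow := L_row red green blue minlength (s : Int) w 0 block[s] segs none 0
        (by simpa using hw)
      simp only [pvCF, Nat.zero_add, List.drop_zero, Nat.cast_zero, List.take_zero,
        List.nil_append] at hrow
      rw [hrow]
      rw [ih (s + 1) (block.set s ((block[s].take w).map (pvW red green blue) ++ block[s].drop w))
        (segs ++ pvSegsGo minlength (s : Int) ((block[s].take w).map (pvMatch red green blue)) 0 none)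
        (by simp; omega)
        (by
          intro row hmem
          rw [pvDropSet _ _ _ _ (by omega)] at hmem
          exact hrows _ (by rw [hdropb]; exact List.mem_cons_of_mem _ hmem))]
      rw [pvDropSet _ _ _ _ (by omega), pvTakeSet _ _ _ hsb, hdropb]
      rw [PySem.List.enumerate_cons]
      rw [show ((s : Int) + 1) = (((s + 1 : Nat)) : Int) from by push_cast; ring]
      simp only [List.flatMap_cons, List.map_cons, Prod.mk.injEq]
      simp [List.append_assoc]

-- B's outer fold, characterised
lemma L_B (red green blue minlength : Int) (w : Nat) :
    ∀ (xs : List (List (Int × Int × Int × Int))) (s0 : Int) (segs : List (Int × Int × Int))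
      (done : List (List (Int × Int × Int × Int))),
    (PySem.List.enumerate xs s0).foldl (fun st jrow =>
        (st.1 ++ pvRuns jrow.1 minlength ((jrow.2.take w).map (pvMatch red green blue)) 0,
         st.2 ++ [(PySem.List.enumerate jrow.2).map (fun ipx =>
            if ipx.1 < (w : Int) ∧ ((jrow.2.take w).map (pvMatch red green blue)).getD ipx.1.toNat false
            then (255, 255, 255, 0) else ipx.2)]))
      (segs, done) =
      (segs ++ (PySem.List.enumerate xs s0).flatMap (fun jrow =>
          pvRuns jrow.1 minlength ((jrow.2.take w).map (pvMatch red green blue)) 0),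
       done ++ xs.map (fun row => (PySem.List.enumerate row).map (fun ipx =>
          if ipx.1 < (w : Int) ∧ ((row.take w).map (pvMatch red green blue)).getD ipx.1.toNat false
          then (255, 255, 255, 0) else ipx.2))) := by
  intro xs
  induction xs with
  | nil => intro s0 segs done; simp [PySem.List.enumerate_nil]
  | cons row xs ih =>
      intro s0 segs done
      rw [PySem.List.enumerate_cons, List.foldl_cons, ih]
      simp [List.append_assoc]

lemma pyGetD_zero_headD {α : Type} (xs : List α) (d : α) :
    PySem.List.pyGetD xs 0 d = xs.headD d := by
  rw [show (0 : Int) = ((0 : Nat) : Int) from rfl, PySem.List.pyGetD_natCast]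
  cases xs <;> simp

-- ===== VERDICT (by name: the statement is the Claim_ definition above) =====
theorem parse_spec : Claim_equal_parse := by
  intro pixblock palette ind minlength _ hpre
  obtain ⟨hne, _, hrows⟩ := hpre
  unfold Spec_parse
  simp only [parse, parse_alt]
  have hA := L_outer (PySem.List.pyGetD palette ind (0, 0, 0, 0)).1
    (PySem.List.pyGetD palette ind (0, 0, 0, 0)).2.1
    (PySem.List.pyGetD palette ind (0, 0, 0, 0)).2.2.1
    minlength (PySem.List.pyGetD pixblock 0 []).length pixblock.length 0 pixblock []
    (by omega)
    (by
      intro row hmem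
      rw [List.drop_zero] at hmem
      rw [pyGetD_zero_headD]
      exact hrows _ hmem)
  simp only [Nat.zero_add, Nat.cast_zero, List.drop_zero, List.take_zero, List.nil_append] at hA
  rw [hA]
  have hB := L_B (PySem.List.pyGetD palette ind (0, 0, 0, 0)).1
    (PySem.List.pyGetD palette ind (0, 0, 0, 0)).2.1
    (PySem.List.pyGetD palette ind (0, 0, 0, 0)).2.2.1
    minlength (PySem.List.pyGetD pixblock 0 []).length pixblock 0 [] []
  simp only [List.nil_append] at hB
  rw [hB]
  simp only [Prod.mk.injEq]
  exact ⟨by simp only [g1], by simp only [L_newrow]⟩
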